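-- pv_equiv track=rewrite | github.com/theMiddleBlue/myLittlePuny | myLittlePuny.py | gentemplate
-- ===== SOURCE A (Python) =====
-- def gentemplate(sld, tld, nchar):
-- 	c=0
-- 	t = ''
-- 	for i in list(sld):
-- 		if nchar == c:
-- 			t=t+'_'
-- 		else:
-- 			t = t+i
-- 		c=(c+1)
-- 	return t+'.'+tld
-- ===== SOURCE B (Python) =====
-- def gentemplate(sld, tld, nchar):
--     if 0 <= nchar < len(sld):
--         return sld[:nchar] + '_' + sld[nchar + 1:] + '.' + tld
--     return sld + '.' + tld
-- ===== Notes on version B (the rewrite author's own statement) =====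
-- stated objective: simpler
-- what changed: Replaces the char-by-char loop with a running counter by a single index-validity check and string slicing.
import Mathlib
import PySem

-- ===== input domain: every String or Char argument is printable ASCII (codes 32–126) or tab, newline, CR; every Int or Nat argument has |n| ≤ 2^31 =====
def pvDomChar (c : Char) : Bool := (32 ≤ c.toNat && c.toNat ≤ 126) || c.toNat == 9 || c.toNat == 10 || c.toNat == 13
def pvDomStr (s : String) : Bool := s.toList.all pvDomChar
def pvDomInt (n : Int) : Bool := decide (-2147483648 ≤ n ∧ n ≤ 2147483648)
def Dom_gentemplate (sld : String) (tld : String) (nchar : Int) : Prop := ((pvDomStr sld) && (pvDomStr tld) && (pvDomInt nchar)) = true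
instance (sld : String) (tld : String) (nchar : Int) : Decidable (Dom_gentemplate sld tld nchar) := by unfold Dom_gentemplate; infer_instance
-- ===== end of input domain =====

-- B replaces A's char-by-char accumulation loop with an index-validity check and string slicing (objective: simpler).


-- ===== PORT A =====
-- the for-loop over list(sld) with counter c and accumulator t (strings handled as List Char, exact on the domain)
def gtLoopA : List Char → Int → Int → List Char → List Char
  | [], _, _, t => t
  | i :: rest, nchar, c, t =>
      gtLoopA rest nchar (c + 1) (if nchar = c then t ++ ['_'] else t ++ [i])

def gentemplate (sld : String) (tld : String) (nchar : Int) : String :=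
  String.ofList (gtLoopA sld.toList nchar 0 [] ++ '.' :: tld.toList)

-- ===== PORT B =====
def gentemplate_alt (sld : String) (tld : String) (nchar : Int) : String :=
  if 0 ≤ nchar ∧ nchar < (sld.toList.length : Int) then
    String.ofList (sld.toList.take nchar.toNat ++ '_' :: sld.toList.drop (nchar.toNat + 1)
                   ++ '.' :: tld.toList)
  else
    String.ofList (sld.toList ++ '.' :: tld.toList)

-- ===== PRECONDITION & SPEC =====
def Spec_gentemplate (sld : String) (tld : String) (nchar : Int) (out : String) : Prop := out = gentemplate_alt sld tld nchar
instance (sld : String) (tld : String) (nchar : Int) (out : String) : Decidable (Spec_gentemplate sld tld nchar out) := by unfold Spec_gentemplate; infer_instance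

-- ===== CLAIM (what is proved, stated in full; the proofs are below) =====
def Claim_equal_gentemplate : Prop := ∀ (sld : String) (tld : String) (nchar : Int), Dom_gentemplate sld tld nchar → Spec_gentemplate sld tld nchar (gentemplate sld tld nchar)

-- ===== LEMMAS AND PROOFS =====

-- A's loop appends to the accumulator the input list with index (nchar - c) replaced by '_'.
def gtRepl : List Char → Int → List Char
  | [], _ => []
  | i :: rest, k => (if k = 0 then '_' else i) :: gtRepl rest (k - 1)

theorem gtLoopA_eq (l : List Char) : ∀ (n c : Int) (t : List Char),
    gtLoopA l n c t = t ++ gtRepl l (n - c) := by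
  induction l with
  | nil => intro n c t; simp [gtLoopA, gtRepl]
  | cons i rest ih =>
    intro n c t
    simp only [gtLoopA, gtRepl, ih]
    by_cases h : n = c
    · have hk : n - c = 0 := by omega
      have hc : n - (c + 1) = n - c - 1 := by omega
      simp [h]
    · have hk : ¬ (n - c = 0) := by omega
      have hc : n - (c + 1) = n - c - 1 := by omega
      simp [h, hk, hc]

theorem gtRepl_char (l : List Char) : ∀ (k : Int),
    gtRepl l k = if 0 ≤ k ∧ k < (l.length : Int) then
      l.take k.toNat ++ '_' :: l.drop (k.toNat + 1) else l := by
  induction l with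
  | nil => intro k; simp [gtRepl]
  | cons i rest ih =>
    intro k
    simp only [gtRepl, ih]
    by_cases h0 : k = 0
    · subst h0
      rw [if_pos rfl, if_neg (by norm_num : ¬ ((0:Int) ≤ 0 - 1 ∧ 0 - 1 < (rest.length : Int))),
        if_pos (by norm_num : (0:Int) ≤ 0 ∧ (0:Int) < ((i :: rest).length : Int))]
      simp
    · by_cases hr : 0 ≤ k - 1 ∧ k - 1 < (rest.length : Int)
      · have hk : 0 ≤ k ∧ k < ((i :: rest).length : Int) := by
          simp only [List.length_cons]; push_cast; omega
        have ht : k.toNat = (k - 1).toNat + 1 := by omega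
        rw [if_neg h0, if_pos hr, if_pos hk, ht]
        simp
      · have hk : ¬ (0 ≤ k ∧ k < ((i :: rest).length : Int)) := by
          simp only [List.length_cons]; push_cast; omega
        rw [if_neg h0, if_neg hr, if_neg hk]

-- ===== VERDICT (by name: the statement is the Claim_ definition above) =====
theorem gentemplate_spec : Claim_equal_gentemplate := by
  intro sld tld nchar _
  show gentemplate sld tld nchar = gentemplate_alt sld tld nchar
  simp only [gentemplate, gentemplate_alt, gtLoopA_eq, gtRepl_char, Int.sub_zero,
    List.nil_append]
  by_cases h : 0 ≤ nchar ∧ nchar < ((sld.toList.length : Nat) : Int)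
  · rw [if_pos h, if_pos h]
  · rw [if_neg h, if_neg h]
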